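-- pv_equiv track=rewrite | github.com/kentnf/tune | tune/core/decision_packet.py | _select_active_resource_issue
-- ===== SOURCE A (Python) =====
-- from typing import Any
--
-- def _select_active_resource_issue(issues: list[dict[str, Any]]) -> dict[str, Any] | None:
--     normalized_issues = [issue for issue in issues if isinstance(issue, dict)]
--     if not normalized_issues:
--         return None
--     for issue in normalized_issues:
--         if str(issue.get("severity") or "").strip() == "blocking":
--             return issue
--     return normalized_issues[0]
-- ===== SOURCE B (Python) =====
-- from typing import Any
--
-- def _select_active_resource_issue(issues: list[dict[str, Any]]) -> dict[str, Any] | None: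
--     candidates = [issue for issue in issues if isinstance(issue, dict)]
--     return min(
--         candidates,
--         key=lambda issue: str(issue.get("severity") or "").strip() != "blocking",
--         default=None,
--     )
-- ===== Notes on version B (the rewrite author's own statement) =====
-- stated objective: alternative
-- what changed: Replaces the filter-then-scan-then-index structure with a selection by priority key: min(candidates, key=issue is not blocking, default=None), relying on min's stability to pick the first blocking dict, else the first dict.
import Mathlib
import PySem

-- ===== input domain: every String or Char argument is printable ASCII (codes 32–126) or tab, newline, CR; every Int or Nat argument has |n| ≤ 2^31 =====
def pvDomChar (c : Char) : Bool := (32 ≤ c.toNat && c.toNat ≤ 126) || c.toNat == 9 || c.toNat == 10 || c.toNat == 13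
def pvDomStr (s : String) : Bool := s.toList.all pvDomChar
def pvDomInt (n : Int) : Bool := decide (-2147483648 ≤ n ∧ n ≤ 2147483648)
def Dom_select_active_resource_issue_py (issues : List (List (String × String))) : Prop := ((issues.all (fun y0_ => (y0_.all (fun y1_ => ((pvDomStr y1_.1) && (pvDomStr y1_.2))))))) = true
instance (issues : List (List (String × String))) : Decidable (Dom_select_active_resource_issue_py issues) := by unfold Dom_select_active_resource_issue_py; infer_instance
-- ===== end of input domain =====

-- B selects the result with min over a priority key (blocking sorts first; min is stable,
-- default=None) instead of A's filter / emptiness check / early-return scan / index-back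
-- structure (objective: alternative). At this Lean type every element is a dict.

-- ===== PORT A =====
-- str(issue.get("severity") or "").strip() == "blocking"
-- (`or ""` maps a missing key or "" to ""; str of a str is identity)
def pvBlocking (issue : List (String × String)) : Bool :=
  PySem.Str.strip (PySem.Dict.getD (PySem.Dict.mk issue) "severity" "") == "blocking"

-- A's `for issue in normalized_issues: if …: return issue` loop (early return = some)
def pvScanA (l : List (List (String × String))) : Option (List (String × String)) :=
  match l with
  | [] => none
  | issue :: rest => if pvBlocking issue then some issue else pvScanA rest

def select_active_resource_issue_py (issues : List (List (String × String))) : Option (List (String × String)) :=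
  let normalized_issues := issues.filter (fun _issue => true)  -- isinstance(issue, dict): always true at this type
  if normalized_issues.isEmpty then none
  else
    match pvScanA normalized_issues with
    | some issue => some issue
    | none => normalized_issues.head?   -- normalized_issues[0] (nonempty here)

-- ===== PORT B =====
-- B's lambda key: str(issue.get("severity") or "").strip() != "blocking"
def pvKeyB (issue : List (String × String)) : Bool :=
  PySem.Str.strip (PySem.Dict.getD (PySem.Dict.mk issue) "severity" "") != "blocking"

def select_active_resource_issue_py_alt (issues : List (List (String × String))) : Option (List (String × String)) :=
  let candidates := issues.filter (fun _issue => true)  -- isinstance(issue, dict): always true at this type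
  PySem.List.min? candidates pvKeyB   -- min(candidates, key=…, default=None): none iff empty

-- ===== PRECONDITION & SPEC =====
def Spec_select_active_resource_issue_py (issues : List (List (String × String))) (out : Option (List (String × String))) : Prop := out = select_active_resource_issue_py_alt issues
instance (issues : List (List (String × String))) (out : Option (List (String × String))) : Decidable (Spec_select_active_resource_issue_py issues out) := by unfold Spec_select_active_resource_issue_py; infer_instance

-- ===== CLAIM =====
def Claim_equal_select_active_resource_issue_py : Prop := ∀ (issues : List (List (String × String))), Dom_select_active_resource_issue_py issues → Spec_select_active_resource_issue_py issues (select_active_resource_issue_py issues)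

-- ===== LEMMAS AND PROOFS =====
theorem pvKeyB_eq_not_blocking (issue : List (String × String)) : pvKeyB issue = !pvBlocking issue := by
  simp [pvKeyB, pvBlocking, bne]

-- min?'s fold step, named so the lemmas below rewrite syntactically
def pvMinStep (acc : Option (List (String × String))) (x : List (String × String)) :
    Option (List (String × String)) :=
  match acc with
  | none => some x
  | some m => if pvKeyB x < pvKeyB m then some x else some m

theorem min?_eq_fold (xs : List (List (String × String))) :
    PySem.List.min? xs pvKeyB = xs.foldl pvMinStep none := by
  unfold PySem.List.min?
  congr 1
  funext acc x
  cases acc <;> rfl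

-- a key-false (blocking) accumulator is never displaced by the min fold
theorem pvFold_false (xs : List (List (String × String))) (m : List (String × String))
    (h : pvKeyB m = false) : xs.foldl pvMinStep (some m) = some m := by
  induction xs with
  | nil => rfl
  | cons x t ih =>
    have : ¬ (pvKeyB x < pvKeyB m) := by rw [h]; simp [Bool.lt_iff]

    simp [pvMinStep, this, ih]

-- a key-true accumulator is replaced by the first key-false element, if any
theorem pvFold_true (xs : List (List (String × String))) (m : List (String × String))
    (h : pvKeyB m = true) :
    xs.foldl pvMinStep (some m) = (pvScanA xs).or (some m) := by
  induction xs generalizing m with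
  | nil => rfl
  | cons x t ih =>
    simp only [List.foldl_cons, pvScanA]
    by_cases hx : pvBlocking x
    · have hk : pvKeyB x = false := by rw [pvKeyB_eq_not_blocking, hx]; rfl
      have hlt : pvKeyB x < pvKeyB m := by rw [hk, h]; exact Bool.lt_iff.mpr (And.intro rfl rfl)
      simp [pvMinStep, hlt, hx, pvFold_false t x hk]
    · have hk : pvKeyB x = true := by rw [pvKeyB_eq_not_blocking]; simp [hx]
      have hlt : ¬ (pvKeyB x < pvKeyB m) := by rw [hk, h]; simp
      simp [pvMinStep, hlt, hx]
      rw [ih m h]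
      cases pvScanA t <;> rfl

-- min-by-priority-key = first blocking element, else the head
theorem pvMin_char (xs : List (List (String × String))) :
    PySem.List.min? xs pvKeyB = (pvScanA xs).or xs.head? := by
  cases xs with
  | nil => rfl
  | cons x t =>
    rw [min?_eq_fold]
    simp only [List.foldl_cons, pvScanA, List.head?, pvMinStep]
    by_cases hx : pvBlocking x
    · have hk : pvKeyB x = false := by rw [pvKeyB_eq_not_blocking, hx]; rfl
      simp [hx, pvFold_false t x hk]
    · have hk : pvKeyB x = true := by rw [pvKeyB_eq_not_blocking]; simp [hx]
      simp [hx]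
      rw [pvFold_true t x hk]
      cases pvScanA t <;> rfl

theorem select_active_resource_issue_py_eq (issues : List (List (String × String))) :
    select_active_resource_issue_py issues = select_active_resource_issue_py_alt issues := by
  unfold select_active_resource_issue_py select_active_resource_issue_py_alt
  rw [pvMin_char]
  cases issues with
  | nil => rfl
  | cons i rest =>
    simp only [List.filter_true, List.isEmpty_cons, ite_false, Bool.false_eq_true]
    cases hs : pvScanA (i :: rest) with
    | some j => simp
    | none => simp

-- ===== VERDICT =====
theorem select_active_resource_issue_py_spec : Claim_equal_select_active_resource_issue_py := by
  intro issues _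
  exact select_active_resource_issue_py_eq issues
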